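-- pv_equiv track=rewrite | github.com/MythicRapha/mythic-mainnet-beta | scripts/calc-topup.py | hex_to_pubkey
-- ===== SOURCE A (Python) =====
-- def hex_to_pubkey(hex_str):
--     try:
--         import base64
--         raw = bytes.fromhex(hex_str)
--         # base58 encode
--         alphabet = b'123456789ABCDEFGHJKLMNPQRSTUVWXYZabcdefghijkmnopqrstuvwxyz'
--         n = int.from_bytes(raw, 'big')
--         result = b''
--         while n > 0:
--             n, r = divmod(n, 58)
--             result = bytes([alphabet[r]]) + result
--         # Add leading zeros
--         for byte in raw:
--             if byte == 0:
--                 result = bytes([alphabet[0]]) + result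
--             else:
--                 break
--         return result.decode()
--     except:
--         return hex_str[:16] + "..."
-- ===== SOURCE B (Python) =====
-- def hex_to_pubkey(hex_str):
--     # base58 via byte-array carry propagation instead of one big int + divmod loop
--     try:
--         raw = bytes.fromhex(hex_str)
--     except ValueError:
--         return hex_str[:16] + "..."
--     alphabet = '123456789ABCDEFGHJKLMNPQRSTUVWXYZabcdefghijkmnopqrstuvwxyz'
--     digits = []  # little-endian base-58 digit values
--     for byte in raw:
--         carry = byte
--         for i in range(len(digits)):
--             v = digits[i] * 256 + carry
--             digits[i] = v % 58
--             carry = v // 58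
--         while carry:
--             digits.append(carry % 58)
--             carry //= 58
--     n_zeros = 0
--     for byte in raw:
--         if byte != 0:
--             break
--         n_zeros += 1
--     return '1' * n_zeros + ''.join(alphabet[d] for d in reversed(digits))
-- ===== Notes on version B (the rewrite author's own statement) =====
-- stated objective: alternative
-- what changed: B replaces A's big-integer conversion (int.from_bytes then repeated divmod by 58 prepending characters) with the classic byte-array base58 algorithm: a list of base-58 digit values updated in place by multiply-by-256-and-add carry propagation per input byte, mapped to the alphabet at the end.
import Mathlib
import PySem

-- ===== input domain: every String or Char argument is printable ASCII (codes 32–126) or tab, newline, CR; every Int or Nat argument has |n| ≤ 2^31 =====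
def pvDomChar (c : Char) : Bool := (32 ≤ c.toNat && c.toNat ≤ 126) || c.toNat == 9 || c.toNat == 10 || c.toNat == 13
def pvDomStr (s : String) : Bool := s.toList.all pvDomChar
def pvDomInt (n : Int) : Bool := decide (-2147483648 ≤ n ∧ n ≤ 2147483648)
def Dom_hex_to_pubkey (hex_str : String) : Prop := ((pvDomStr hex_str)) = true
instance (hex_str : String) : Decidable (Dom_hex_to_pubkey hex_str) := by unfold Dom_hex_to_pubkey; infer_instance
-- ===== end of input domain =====

-- B replaces the big-int divmod loop by the byte-array carry-propagation base58 algorithm (alternative; return value only).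

-- ===== PORT A =====
-- shared helper: bytes.fromhex — skips ASCII whitespace between byte pairs, none = ValueError (exact for Dom strings)
def pvIsHexWs (c : Char) : Bool := c = ' ' || c = '\t' || c = '\n' || c = '\r'

def pvHexVal? (c : Char) : Option Nat :=
  if '0' ≤ c ∧ c ≤ '9' then some (c.toNat - 48)
  else if 'a' ≤ c ∧ c ≤ 'f' then some (c.toNat - 87)
  else if 'A' ≤ c ∧ c ≤ 'F' then some (c.toNat - 55)
  else none

def pvFromHex? : List Char → Option (List Nat)
  | [] => some []
  | c :: rest =>
    if pvIsHexWs c then pvFromHex? rest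
    else
      match pvHexVal? c, rest with
      | some h, d :: rest' =>
        match pvHexVal? d with
        | some l => (pvFromHex? rest').map (fun bs => (h * 16 + l) :: bs)
        | none => none
      | _, _ => none

def pvAlpha : List Char := "123456789ABCDEFGHJKLMNPQRSTUVWXYZabcdefghijkmnopqrstuvwxyz".toList

def pvAlphaGet (r : Nat) : Char := pvAlpha.getD r '1'

-- while n > 0: n, r = divmod(n, 58); result = alphabet[r] + result
def pvEncodeLoop : Nat → List Char → List Char
  | 0, acc => acc
  | n + 1, acc => pvEncodeLoop ((n + 1) / 58) (pvAlphaGet ((n + 1) % 58) :: acc)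
decreasing_by exact Nat.div_lt_self (Nat.succ_pos n) (by omega)

-- for byte in raw: if byte == 0: result = alphabet[0] + result else: break
def pvAddOnes : List Nat → List Char → List Char
  | [], acc => acc
  | b :: t, acc => if b = 0 then pvAddOnes t ('1' :: acc) else acc

def hex_to_pubkey (hex_str : String) : String :=
  match pvFromHex? hex_str.toList with
  | none => String.ofList (hex_str.toList.take 16) ++ "..."   -- hex_str[:16] + "..."
  | some raw =>
    let n := raw.foldl (fun a b => 256 * a + b) 0           -- int.from_bytes(raw, 'big')
    String.ofList (pvAddOnes raw (pvEncodeLoop n []))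

-- ===== PORT B =====
-- inner loop over digits followed by the carry-append while loop
def pvToDigitsLE : Nat → List Nat
  | 0 => []
  | c + 1 => (c + 1) % 58 :: pvToDigitsLE ((c + 1) / 58)
decreasing_by exact Nat.div_lt_self (Nat.succ_pos c) (by omega)

def pvMulAdd : List Nat → Nat → List Nat
  | [], carry => pvToDigitsLE carry
  | d :: t, carry => (d * 256 + carry) % 58 :: pvMulAdd t ((d * 256 + carry) / 58)

def hex_to_pubkey_alt (hex_str : String) : String :=
  match pvFromHex? hex_str.toList with
  | none => String.ofList (hex_str.toList.take 16) ++ "..."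
  | some raw =>
    let digits := raw.foldl pvMulAdd []                     -- little-endian base-58 digits
    let nZeros := (raw.takeWhile (· = 0)).length            -- counting loop with break
    String.ofList (List.replicate nZeros '1' ++ digits.reverse.map pvAlphaGet)

-- ===== PRECONDITION & SPEC =====
def Spec_hex_to_pubkey (hex_str : String) (out : String) : Prop := out = hex_to_pubkey_alt hex_str
instance (hex_str : String) (out : String) : Decidable (Spec_hex_to_pubkey hex_str out) := by unfold Spec_hex_to_pubkey; infer_instance

-- ===== CLAIM (what is proved, stated in full; the proofs are below) =====
def Claim_equal_hex_to_pubkey : Prop := ∀ (hex_str : String), Dom_hex_to_pubkey hex_str → Spec_hex_to_pubkey hex_str (hex_to_pubkey hex_str)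

-- ===== LEMMAS AND PROOFS =====

-- digits of n in base 58, most significant first (abstract reference both loops are related to)
def pvDigits : Nat → List Nat
  | 0 => []
  | n + 1 => pvDigits ((n + 1) / 58) ++ [(n + 1) % 58]
decreasing_by exact Nat.div_lt_self (Nat.succ_pos n) (by omega)

def pvValLE : List Nat → Nat
  | [] => 0
  | d :: t => d + 58 * pvValLE t

def pvLastNZ : List Nat → Prop
  | [] => True
  | [d] => d ≠ 0
  | _ :: d :: t => pvLastNZ (d :: t)

lemma pvDigits_pos {n : Nat} (h : 0 < n) : pvDigits n = pvDigits (n / 58) ++ [n % 58] := by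
  cases n with
  | zero => omega
  | succ m => rw [pvDigits]

lemma pvEncodeLoop_eq (n : Nat) : ∀ acc, pvEncodeLoop n acc = (pvDigits n).map pvAlphaGet ++ acc := by
  induction n using Nat.strong_induction_on with
  | _ n ih =>
    intro acc
    cases n with
    | zero => simp [pvEncodeLoop, pvDigits]
    | succ m =>
      rw [pvEncodeLoop, ih ((m + 1) / 58) (Nat.div_lt_self (Nat.succ_pos m) (by omega)), pvDigits]
      simp

lemma pvAddOnes_eq (raw : List Nat) (acc : List Char) :
    pvAddOnes raw acc = List.replicate (raw.takeWhile (· = 0)).length '1' ++ acc := by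
  induction raw generalizing acc with
  | nil => simp [pvAddOnes]
  | cons b t ih =>
    by_cases hb : b = 0
    · simp [pvAddOnes, hb, ih, List.replicate_succ']
    · simp [pvAddOnes, hb]

lemma pvValLE_toDigitsLE (c : Nat) : pvValLE (pvToDigitsLE c) = c := by
  induction c using Nat.strong_induction_on with
  | _ c ih =>
    cases c with
    | zero => simp [pvToDigitsLE, pvValLE]
    | succ m =>
      rw [pvToDigitsLE, pvValLE, ih ((m + 1) / 58) (Nat.div_lt_self (Nat.succ_pos m) (by omega))]
      omega

lemma pvToDigitsLE_ne_nil {c : Nat} (h : 0 < c) : pvToDigitsLE c ≠ [] := by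
  cases c with
  | zero => omega
  | succ m => rw [pvToDigitsLE]; simp

lemma pvLastNZ_cons (a : Nat) {l : List Nat} (h : l ≠ []) : pvLastNZ (a :: l) ↔ pvLastNZ l := by
  cases l with
  | nil => exact absurd rfl h
  | cons x t => exact Iff.rfl

lemma pvToDigitsLE_canon (c : Nat) : (∀ d ∈ pvToDigitsLE c, d < 58) ∧ pvLastNZ (pvToDigitsLE c) := by
  induction c using Nat.strong_induction_on with
  | _ c ih =>
    cases c with
    | zero => exact ⟨by simp [pvToDigitsLE], by rw [pvToDigitsLE]; exact trivial⟩
    | succ m =>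
      obtain ⟨ihb, ihz⟩ := ih ((m + 1) / 58) (Nat.div_lt_self (Nat.succ_pos m) (by omega))
      rw [pvToDigitsLE]
      refine ⟨?_, ?_⟩
      · intro d hd
        rcases List.mem_cons.mp hd with h | h
        · omega
        · exact ihb d h
      · by_cases hq : (m + 1) / 58 = 0
        · rw [hq]; simp only [pvToDigitsLE]
          show (m + 1) % 58 ≠ 0
          omega
        · rw [pvLastNZ_cons _ (pvToDigitsLE_ne_nil (Nat.pos_of_ne_zero hq))]
          exact ihz

lemma pvMulAdd_val (ds : List Nat) (c : Nat) : pvValLE (pvMulAdd ds c) = 256 * pvValLE ds + c := by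
  induction ds generalizing c with
  | nil => simp [pvMulAdd, pvValLE, pvValLE_toDigitsLE]
  | cons d t ih =>
    rw [pvMulAdd, pvValLE, ih, pvValLE]
    have := Nat.mod_add_div (d * 256 + c) 58
    omega

lemma pvMulAdd_ne_nil {ds : List Nat} (h : ds ≠ []) (c : Nat) : pvMulAdd ds c ≠ [] := by
  cases ds with
  | nil => exact absurd rfl h
  | cons d t => rw [pvMulAdd]; simp

lemma pvMulAdd_canon (ds : List Nat) (c : Nat) (h1 : ∀ d ∈ ds, d < 58) (h2 : pvLastNZ ds) :
    (∀ d ∈ pvMulAdd ds c, d < 58) ∧ pvLastNZ (pvMulAdd ds c) := by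
  induction ds generalizing c with
  | nil => exact pvToDigitsLE_canon c
  | cons d t ih =>
    rw [pvMulAdd]
    cases t with
    | nil =>
      have hd : d ≠ 0 := h2
      have hv : 58 ≤ d * 256 + c := by nlinarith [Nat.one_le_iff_ne_zero.mpr hd]
      have hq : 0 < (d * 256 + c) / 58 := Nat.div_pos hv (by omega)
      obtain ⟨cb, cz⟩ := pvToDigitsLE_canon ((d * 256 + c) / 58)
      refine ⟨?_, ?_⟩
      · intro x hx
        rcases List.mem_cons.mp hx with h | h
        · omega
        · exact cb x (by simpa [pvMulAdd] using h)
      · have hne : pvMulAdd ([] : List Nat) ((d * 256 + c) / 58) ≠ [] := by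
          rw [pvMulAdd]; exact pvToDigitsLE_ne_nil hq
        rw [pvLastNZ_cons _ hne, pvMulAdd]
        exact cz
    | cons x t' =>
      have h1' : ∀ d ∈ x :: t', d < 58 := fun e he => h1 e (List.mem_cons_of_mem _ he)
      have h2' : pvLastNZ (x :: t') := h2
      obtain ⟨cb, cz⟩ := ih ((d * 256 + c) / 58) h1' h2'
      refine ⟨?_, ?_⟩
      · intro e he
        rcases List.mem_cons.mp he with h | h
        · omega
        · exact cb e h
      · rw [pvLastNZ_cons _ (pvMulAdd_ne_nil (by simp) _)]
        exact cz

lemma pvValLE_pos (ds : List Nat) (hne : ds ≠ []) (h2 : pvLastNZ ds) : 0 < pvValLE ds := by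
  induction ds with
  | nil => exact absurd rfl hne
  | cons d t ih =>
    cases t with
    | nil =>
      have hd : d ≠ 0 := h2
      simp [pvValLE]; omega
    | cons x t' =>
      have := ih (by simp) h2
      rw [pvValLE]; omega

lemma pvDigits_valLE (ds : List Nat) (h1 : ∀ d ∈ ds, d < 58) (h2 : pvLastNZ ds) :
    pvDigits (pvValLE ds) = ds.reverse := by
  induction ds with
  | nil => simp [pvValLE, pvDigits]
  | cons d t ih =>
    have hd : d < 58 := h1 d (List.mem_cons_self ..)
    rw [pvValLE]
    cases t with
    | nil =>
      have hdz : d ≠ 0 := h2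
      rw [pvDigits_pos (by simp [pvValLE]; omega)]
      have : (d + 58 * pvValLE ([] : List Nat)) / 58 = 0 := by simp [pvValLE]; omega
      rw [this]
      simp [pvValLE, pvDigits]
      omega
    | cons x t' =>
      have hvt : 0 < pvValLE (x :: t') := pvValLE_pos _ (by simp) h2
      rw [pvDigits_pos (by omega)]
      have hq : (d + 58 * pvValLE (x :: t')) / 58 = pvValLE (x :: t') := by omega
      have hr : (d + 58 * pvValLE (x :: t')) % 58 = d := by omega
      rw [hq, hr, ih (fun e he => h1 e (List.mem_cons_of_mem _ he)) h2]
      simp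

lemma pvFoldl_mulAdd (raw : List Nat) : ∀ ds, (∀ d ∈ ds, d < 58) → pvLastNZ ds →
    pvValLE (raw.foldl pvMulAdd ds) = raw.foldl (fun a b => 256 * a + b) (pvValLE ds) ∧
    (∀ d ∈ raw.foldl pvMulAdd ds, d < 58) ∧ pvLastNZ (raw.foldl pvMulAdd ds) := by
  induction raw with
  | nil => exact fun ds h1 h2 => ⟨rfl, h1, h2⟩
  | cons b t ih =>
    intro ds h1 h2
    obtain ⟨cb, cz⟩ := pvMulAdd_canon ds b h1 h2
    obtain ⟨v, b', z'⟩ := ih (pvMulAdd ds b) cb cz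
    refine ⟨?_, b', z'⟩
    simp only [List.foldl_cons, v, pvMulAdd_val]

-- ===== VERDICT (by name: the statement is the Claim_ definition above) =====
theorem hex_to_pubkey_spec : Claim_equal_hex_to_pubkey := by
  intro s _
  unfold Spec_hex_to_pubkey hex_to_pubkey hex_to_pubkey_alt
  cases h : pvFromHex? s.toList with
  | none => rfl
  | some raw =>
    simp only []
    obtain ⟨hv, hb, hnz⟩ := pvFoldl_mulAdd raw [] (by simp) trivial
    rw [pvEncodeLoop_eq, pvAddOnes_eq]
    simp only [pvValLE] at hv
    rw [← hv, pvDigits_valLE _ hb hnz]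
    simp [List.map_reverse]
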